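-- pv_equiv track=rewrite | github.com/JaeguKim/ROAD-TO-BLUE-CODER | KAKAO/2019KAKAO_RECRUIT/blockGame.py | solution
-- ===== SOURCE A (Python) =====
-- def canFill(board,block,n):
--     sortByRow = sorted(block,key=lambda x: x[0])
--     minRow = sortByRow[0][0]
--     maxRow = sortByRow[-1][0]
--     sortByCol = sorted(block,key=lambda x: x[1])
--     minCol = sortByCol[0][1]
--     maxCol = sortByCol[-1][1]
--
--     emptyBlocks = []
--     for row in range(minRow,maxRow+1):
--         for col in range(minCol,maxCol+1):
--             if [row,col] not in block:
--                 emptyBlocks.append([row,col])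
--
--     for block in emptyBlocks:
--         for i in range(block[0]+1):
--             if board[i][block[1]] != 0:
--                 return False
--     return True
--
-- def makeBlockDict(board,n):
--     blockDict = {}
--     for i in range(n):
--         for j in range(n):
--             num = board[i][j]
--             if num != 0:
--                 if num not in blockDict.keys():
--                     blockDict[num] = []
--                 blockDict[num].append([i,j])
--
--     return blockDict
--
-- def eraseBlock(board,block):
--     for coord in block:
--         row = coord[0]
--         col = coord[1]
--         board[row][col] = 0
--
-- def solution(board):
--     n = len(board)
--     blockDict = makeBlockDict(board,n)
--     res = 0
--     isErased = True
--     while isErased: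
--         isErased = False
--         keyListForRemove = []
--         for key in blockDict.keys():
--             block = blockDict[key]
--             if canFill(board,block,n):
--                 eraseBlock(board,block)
--                 res+=1
--                 isErased = True
--                 keyListForRemove.append(key)
--         for key in keyListForRemove:
--             blockDict.pop(key)
--     return res
-- ===== SOURCE B (Python) =====
-- def _reqs(cells):
--     # per-column requirement of a block: column c of the bounding box must be
--     # clear from the top down to row m, the deepest bounding-box cell in that
--     # column that does not belong to the block (m = -1: no requirement)
--     rows = [r for r, _ in cells]
--     cols = [c for _, c in cells]
--     r0, r1, c0, c1 = min(rows), max(rows), min(cols), max(cols)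
--     cellset = set(cells)
--     reqs = []
--     for c in range(c0, c1 + 1):
--         m = -1
--         for r in range(r0, r1 + 1):
--             if (r, c) not in cellset:
--                 m = r
--         reqs.append((c, m))
--     return reqs
--
--
-- def _fillable(board, reqs):
--     return all(board[r][c] == 0 for c, m in reqs for r in range(m + 1))
--
--
-- def _erase(board, cells):
--     for r, c in cells:
--         board[r][c] = 0
--
--
-- def solution(board):
--     # NOTE: like the original, this zeroes the erased cells of `board` in place.
--     n = len(board)
--     order = []
--     seen = set()
--     for i in range(n):
--         for j in range(n):
--             v = board[i][j]
--             if v != 0 and v not in seen: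
--                 seen.add(v)
--                 order.append(v)
--     blocks = []
--     for v in order:
--         cells = [(i, j) for i in range(n) for j in range(n) if board[i][j] == v]
--         blocks.append((cells, _reqs(cells)))
--     res = 0
--     erased = True
--     while erased:
--         erased = False
--         rest = []
--         for cells, reqs in blocks:
--             if _fillable(board, reqs):
--                 _erase(board, cells)
--                 res += 1
--                 erased = True
--             else:
--                 rest.append((cells, reqs))
--         blocks = rest
--     return res
-- ===== Notes on version B (the rewrite author's own statement) =====
-- stated objective: faster
-- what changed: Instead of re-deriving each block's bounding box by sorting and rescanning columns cell-by-cell with linear list membership on every pass, B precomputes once per block (via a set) the per-column depth to which the board must be clear, and each pass checks only those prefixes, keeping unerased blocks in a filtered list instead of a dict with key-removal passes.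
import Mathlib
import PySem

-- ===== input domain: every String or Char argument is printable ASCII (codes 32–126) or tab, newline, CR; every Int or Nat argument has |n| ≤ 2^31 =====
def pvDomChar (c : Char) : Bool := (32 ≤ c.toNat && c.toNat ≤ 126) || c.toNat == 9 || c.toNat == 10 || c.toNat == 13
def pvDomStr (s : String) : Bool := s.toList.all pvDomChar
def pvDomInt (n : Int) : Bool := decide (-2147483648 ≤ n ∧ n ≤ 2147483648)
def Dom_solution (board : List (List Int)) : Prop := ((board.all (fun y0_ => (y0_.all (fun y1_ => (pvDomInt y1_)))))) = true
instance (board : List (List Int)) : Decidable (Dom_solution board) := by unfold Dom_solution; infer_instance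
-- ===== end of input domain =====

-- B precomputes per-block per-column clearance depths once (with set membership) and
-- re-checks only those prefixes each pass — measured faster than A's repeated
-- sort/bbox/column rescans.  Both Pythons zero erased cells of `board` in place;
-- the equivalence proved here is about the RETURN value (B performs the same mutation).

-- ===== PORT A =====
-- board[i][j] and board[i][j] = 0, the literal cell accesses both Pythons write
-- (defaults of pyGetD/pySetD are unreached on inputs admitted by Pre_solution)
def pvCell (board : List (List Int)) (i j : Int) : Int :=
  PySem.List.pyGetD (PySem.List.pyGetD board i []) j 0

def pvSetCell (board : List (List Int)) (i j : Int) : List (List Int) :=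
  PySem.List.pySetD board i (PySem.List.pySetD (PySem.List.pyGetD board i []) j 0)

-- canFill(board, block, n); block entries are the two-element lists [i, j] A builds,
-- so the x[0] / x[-1] / x[1] indexings (ported via pyGetD, defaults unreached) succeed
def canFill (board : List (List Int)) (block : List (List Int)) (n : Int) : Bool :=
  let sortByRow := PySem.List.sorted block (fun x => PySem.List.pyGetD x 0 0)
  let minRow := PySem.List.pyGetD (PySem.List.pyGetD sortByRow 0 []) 0 0
  let maxRow := PySem.List.pyGetD (PySem.List.pyGetD sortByRow (-1) []) 0 0
  let sortByCol := PySem.List.sorted block (fun x => PySem.List.pyGetD x 1 0)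
  let minCol := PySem.List.pyGetD (PySem.List.pyGetD sortByCol 0 []) 1 0
  let maxCol := PySem.List.pyGetD (PySem.List.pyGetD sortByCol (-1) []) 1 0
  let emptyBlocks := (PySem.List.pyRange minRow (maxRow + 1)).foldl (fun acc row =>
      (PySem.List.pyRange minCol (maxCol + 1)).foldl (fun acc col =>
        if [row, col] ∈ block then acc else acc ++ [[row, col]]) acc) []
  emptyBlocks.all (fun blk =>
    (PySem.List.pyRange 0 (PySem.List.pyGetD blk 0 0 + 1)).all (fun i =>
      pvCell board i (PySem.List.pyGetD blk 1 0) == 0))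

def makeBlockDict (board : List (List Int)) (n : Int) : PySem.Dict Int (List (List Int)) :=
  (PySem.List.pyRange 0 n).foldl (fun d i =>
    (PySem.List.pyRange 0 n).foldl (fun d j =>
      let num := pvCell board i j
      if num ≠ 0 then
        let d' := if d.contains num then d else d.insert num []
        d'.modify num [] (fun l => l ++ [[i, j]])
      else d) d) PySem.Dict.empty

def eraseBlock (board : List (List Int)) (block : List (List Int)) : List (List Int) :=
  block.foldl (fun b coord =>
    pvSetCell b (PySem.List.pyGetD coord 0 0) (PySem.List.pyGetD coord 1 0)) board

-- the while-loop; each continuing pass pops at least one key, so size+1 passes suffice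
def pvLoopA (n : Int) : Nat → List (List Int) → PySem.Dict Int (List (List Int)) → Int → Int
  | 0, _, _, res => res
  | fuel+1, board, bd, res =>
    let st := bd.keys.foldl (fun (s : List (List Int) × Int × Bool × List Int) key =>
      let block := bd.getD key []
      if canFill s.1 block n then (eraseBlock s.1 block, s.2.1 + 1, true, s.2.2.2 ++ [key])
      else s) (board, res, false, [])
    let bd' := st.2.2.2.foldl (fun d k => ((d.pop? k).map (fun p => p.2)).getD d) bd
    if st.2.2.1 then pvLoopA n fuel st.1 bd' st.2.1 else st.2.1

def solution (board : List (List Int)) : Int :=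
  let n : Int := board.length
  let bd := makeBlockDict board n
  pvLoopA n (bd.size + 1) board bd 0

-- ===== PORT B =====
-- _reqs(cells): per-column clearance depths of one block (min/max raise on [] — unreached)
def pvReqs (cells : List (Int × Int)) : List (Int × Int) :=
  let rows := cells.map (fun p => p.1)
  let cols := cells.map (fun p => p.2)
  let r0 := PySem.List.minD rows (fun x => x) 0
  let r1 := PySem.List.maxD rows (fun x => x) 0
  let c0 := PySem.List.minD cols (fun x => x) 0
  let c1 := PySem.List.maxD cols (fun x => x) 0
  let cellset := PySem.Set.ofList cells
  (PySem.List.pyRange c0 (c1 + 1)).foldl (fun rq c =>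
    let m := (PySem.List.pyRange r0 (r1 + 1)).foldl
      (fun m r => if PySem.Set.contains cellset (r, c) then m else r) (-1)
    rq ++ [(c, m)]) []

def pvFillable (board : List (List Int)) (reqs : List (Int × Int)) : Bool :=
  reqs.all (fun cm => (PySem.List.pyRange 0 (cm.2 + 1)).all (fun r => pvCell board r cm.1 == 0))

def pvErase (board : List (List Int)) (cells : List (Int × Int)) : List (List Int) :=
  cells.foldl (fun b p => pvSetCell b p.1 p.2) board

-- the while-loop; each continuing pass drops at least one block, so length+1 passes suffice
def pvLoopB : Nat → List (List Int) → List (List (Int × Int) × List (Int × Int)) → Int → Int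
  | 0, _, _, res => res
  | fuel+1, board, blocks, res =>
    let st := blocks.foldl
      (fun (s : List (List Int) × Int × Bool × List (List (Int × Int) × List (Int × Int))) blk =>
        if pvFillable s.1 blk.2 then (pvErase s.1 blk.1, s.2.1 + 1, true, s.2.2.2)
        else (s.1, s.2.1, s.2.2.1, s.2.2.2 ++ [blk])) (board, res, false, [])
    if st.2.2.1 then pvLoopB fuel st.1 st.2.2.2 st.2.1 else st.2.1

def solution_alt (board : List (List Int)) : Int :=
  let n : Int := board.length
  let os := (PySem.List.pyRange 0 n).foldl (fun (s : PySem.Set Int × List Int) i =>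
    (PySem.List.pyRange 0 n).foldl (fun s j =>
      let v := pvCell board i j
      if v ≠ 0 ∧ ¬ PySem.Set.contains s.1 v then (PySem.Set.add s.1 v, s.2 ++ [v]) else s) s)
    (PySem.Set.empty, [])
  let blocks := os.2.foldl (fun acc v =>
    let cells := (PySem.List.pyRange 0 n).foldl (fun cs i =>
      (PySem.List.pyRange 0 n).foldl (fun cs j =>
        if pvCell board i j = v then cs ++ [(i, j)] else cs) cs) []
    acc ++ [(cells, pvReqs cells)]) []
  pvLoopB (blocks.length + 1) board blocks 0

-- ===== PRECONDITION & SPEC =====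
-- A (and B) index board[i][j] for all i, j < len(board): a row shorter than the board
-- raises IndexError in both; Pre_ excludes exactly those boards.
def Pre_solution (board : List (List Int)) : Prop :=
  ∀ row ∈ board, board.length ≤ row.length
instance (board : List (List Int)) : Decidable (Pre_solution board) := by
  unfold Pre_solution; infer_instance

def pvWitness_solution : List (List Int) := [[1, 0], [0, 1]]

def Spec_solution (board : List (List Int)) (out : Int) : Prop := out = solution_alt board
instance (board : List (List Int)) (out : Int) : Decidable (Spec_solution board out) := by
  unfold Spec_solution; infer_instance

-- ===== CLAIM (what is proved, stated in full; the proofs are below) =====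
def Claim_equal_solution : Prop :=
  ∀ (board : List (List Int)), Dom_solution board → Pre_solution board →
    Spec_solution board (solution board)

-- ---------- canonical descriptions of the preprocessing (proof-side only) ----------

def pvToList (p : Int × Int) : List Int := [p.1, p.2]

def pvNums (board : List (List Int)) (n : Int) : List Int :=
  ((PySem.List.pyRange 0 n).flatMap (fun i => (PySem.List.pyRange 0 n).map (pvCell board i))).filter
    (fun v => decide (v ≠ 0))

def pvPairs (board : List (List Int)) (n : Int) : List (Int × List Int) :=
  (PySem.List.pyRange 0 n).flatMap (fun i => (PySem.List.pyRange 0 n).filterMap (fun j =>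
    if pvCell board i j ≠ 0 then some (pvCell board i j, [i, j]) else none))

def pvCellsOf (board : List (List Int)) (n : Int) (v : Int) : List (Int × Int) :=
  (PySem.List.pyRange 0 n).flatMap (fun i =>
    ((PySem.List.pyRange 0 n).filter (fun j => decide (pvCell board i j = v))).map (fun j => (i, j)))

-- ---------- generic fold shapes ----------

theorem pv_foldl_if_some {α β δ : Type} (p : α → Prop) [DecidablePred p] (g : α → β)
    (step : δ → β → δ) (l : List α) (d0 : δ) :
    l.foldl (fun d x => if p x then step d (g x) else d) d0
      = (l.filterMap (fun x => if p x then some (g x) else none)).foldl step d0 := by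
  induction l generalizing d0 with
  | nil => rfl
  | cons x xs ih =>
    by_cases h : p x <;> simp [h, ih]

-- ---------- A's makeBlockDict ----------

theorem pv_ensure_modify {κ ν : Type} [BEq κ] [LawfulBEq κ] (d : PySem.Dict κ ν) (k : κ)
    (v0 : ν) (f : ν → ν) :
    ((if d.contains k then d else d.insert k v0).modify k v0 f) = d.modify k v0 f := by
  by_cases h : d.contains k
  · simp [h]
  · have h' : d.contains k = false := by simpa using h
    simp only [h', Bool.false_eq_true, if_false, PySem.Dict.modify]
    rw [PySem.Dict.getD_insert_self, PySem.Dict.insert_insert_self,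
      PySem.Dict.getD_of_not_contains (h := h')]

theorem pv_mkbd_eq (board : List (List Int)) (n : Int) :
    makeBlockDict board n
      = (pvPairs board n).foldl (fun d p => d.modify p.1 [] (fun l => l ++ [p.2]))
          PySem.Dict.empty := by
  unfold makeBlockDict pvPairs
  rw [List.foldl_flatMap]
  congr 1
  funext d i
  simp only [pv_ensure_modify]
  exact pv_foldl_if_some (fun j => pvCell board i j ≠ 0) (fun j => (pvCell board i j, [i, j]))
    (fun d p => d.modify p.1 [] (fun l => l ++ [p.2])) _ d


theorem pv_map_fst_pairs (board : List (List Int)) (n : Int) :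
    (pvPairs board n).map Prod.fst = pvNums board n := by
  unfold pvPairs pvNums
  rw [List.map_flatMap, List.filter_flatMap]
  congr 1
  funext i
  induction (PySem.List.pyRange 0 n) with
  | nil => rfl
  | cons j js ih =>
    by_cases h : pvCell board i j = 0
    · simpa [h] using ih
    · simpa [h] using ih

theorem pv_keys_mkbd (board : List (List Int)) (n : Int) :
    (makeBlockDict board n).keys = PySem.Set.ofList (pvNums board n) := by
  rw [pv_mkbd_eq]
  have := PySem.Dict.keys_foldl_modify_key (pvPairs board n) Prod.fst
    ([] : List (List Int)) (fun _ x l => l ++ [x.2]) PySem.Dict.empty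
  simpa [pv_map_fst_pairs, PySem.Set.ofList_eq_foldl, PySem.Set.update] using this

theorem pv_nodup_keys_mkbd (board : List (List Int)) (n : Int) :
    (makeBlockDict board n).keys.Nodup := by
  rw [pv_mkbd_eq]
  exact PySem.Dict.nodup_keys_foldl_modify_key _ Prod.fst _ _ _ PySem.Dict.nodup_keys_empty

theorem pv_getD_mkbd (board : List (List Int)) (n : Int) (v : Int) (hv : v ≠ 0) :
    (makeBlockDict board n).getD v [] = (pvCellsOf board n v).map pvToList := by
  rw [pv_mkbd_eq, PySem.Dict.getD_foldl_modify_append]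
  rw [show (PySem.Dict.empty : PySem.Dict Int (List (List Int))).getD v [] = [] from rfl,
    List.nil_append]
  unfold pvPairs pvCellsOf
  rw [List.filter_flatMap, List.map_flatMap, List.map_flatMap]
  congr 1
  funext i
  induction (PySem.List.pyRange 0 n) with
  | nil => rfl
  | cons j js ih =>
    by_cases h : pvCell board i j = v
    · have h0 : pvCell board i j ≠ 0 := by rw [h]; exact hv
      simpa [List.filterMap_cons, List.filter_cons, h, h0, hv, pvToList, Function.comp] using ih
    · by_cases h0 : pvCell board i j = 0
      · have hv' : ¬ (0 : Int) = v := fun hh => hv hh.symm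
        simpa [List.filterMap_cons, List.filter_cons, h0, h, hv, hv', Function.comp] using ih
      · simpa [List.filterMap_cons, List.filter_cons, h0, h, hv, Function.comp] using ih

-- ---------- B's preprocessing ----------

theorem pv_diag (l : List Int) (s : PySem.Set Int) :
    l.foldl (fun (t : PySem.Set Int × List Int) v =>
        if v ≠ 0 ∧ ¬ PySem.Set.contains t.1 v then (PySem.Set.add t.1 v, t.2 ++ [v]) else t) (s, s)
      = (l.foldl (fun t v => if v ≠ 0 then PySem.Set.add t v else t) s,
         l.foldl (fun t v => if v ≠ 0 then PySem.Set.add t v else t) s) := by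
  induction l generalizing s with
  | nil => rfl
  | cons v vs ih =>
    by_cases hv : v = 0
    · simp only [List.foldl_cons, hv]
      simpa using ih s
    · by_cases hc : PySem.Set.contains s v
      · have hmem : v ∈ s := (PySem.Set.contains_iff s v).mp hc
        have hadd : PySem.Set.add s v = s := by simp [PySem.Set.add, hmem]
        simp only [List.foldl_cons, hadd]
        simpa [hv, hc, hmem, hadd] using ih s
      · have hmem : v ∉ s := fun m => hc ((PySem.Set.contains_iff s v).mpr m)
        have hadd : PySem.Set.add s v = s ++ [v] := by simp [PySem.Set.add, hmem]
        simp only [List.foldl_cons, hadd]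
        simpa [hv, hc, hmem, hadd] using ih (s ++ [v])

theorem pv_os_eq (board : List (List Int)) (n : Int) :
    ((PySem.List.pyRange 0 n).foldl (fun (s : PySem.Set Int × List Int) i =>
      (PySem.List.pyRange 0 n).foldl (fun s j =>
        let v := pvCell board i j
        if v ≠ 0 ∧ ¬ PySem.Set.contains s.1 v then (PySem.Set.add s.1 v, s.2 ++ [v]) else s) s)
      (PySem.Set.empty, []))
    = (PySem.Set.ofList (pvNums board n), PySem.Set.ofList (pvNums board n)) := by
  have h1 : ∀ (i : Int) (s : PySem.Set Int × List Int),
      (PySem.List.pyRange 0 n).foldl (fun s j =>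
        let v := pvCell board i j
        if v ≠ 0 ∧ ¬ PySem.Set.contains s.1 v then (PySem.Set.add s.1 v, s.2 ++ [v]) else s) s
      = ((PySem.List.pyRange 0 n).map (pvCell board i)).foldl (fun s v =>
          if v ≠ 0 ∧ ¬ PySem.Set.contains s.1 v then (PySem.Set.add s.1 v, s.2 ++ [v]) else s) s := by
    intro i s; rw [List.foldl_map]
  simp only [h1]
  rw [← List.foldl_flatMap,
    show ((PySem.Set.empty, ([] : List Int)) : PySem.Set Int × List Int)
        = (PySem.Set.empty, PySem.Set.empty) from rfl,
    pv_diag, PySem.List.foldl_ite_eq_foldl_filter]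
  unfold pvNums
  rw [PySem.Set.ofList_eq_foldl]
  rfl

theorem pv_cellsB_eq (board : List (List Int)) (n v : Int) :
    ((PySem.List.pyRange 0 n).foldl (fun cs i =>
      (PySem.List.pyRange 0 n).foldl (fun cs j =>
        if pvCell board i j = v then cs ++ [(i, j)] else cs) cs) [])
    = pvCellsOf board n v := by
  unfold pvCellsOf
  simp only [PySem.List.foldl_append_ite]
  rw [PySem.List.foldl_append_eq_flatMap]
  simp

-- ---------- erasing ----------

theorem pv_erase_eq (b : List (List Int)) (cells : List (Int × Int)) :
    eraseBlock b (cells.map pvToList) = pvErase b cells := by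
  unfold eraseBlock pvErase
  rw [List.foldl_map]
  have hfun : (fun (bb : List (List Int)) (p : Int × Int) =>
      pvSetCell bb (PySem.List.pyGetD (pvToList p) 0 0) (PySem.List.pyGetD (pvToList p) 1 0))
      = (fun bb p => pvSetCell bb p.1 p.2) := by
    funext bb p
    simp [pvToList, PySem.List.pyGetD_ofNat']
  rw [hfun]

-- ---------- the fill check ----------

theorem pv_key_head (block : List (List Int)) (key : List Int → Int) (hne : block ≠ []) :
    key (PySem.List.pyGetD (PySem.List.sorted block key) 0 [])
      = PySem.List.minD (block.map key) (fun x => x) 0 := by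
  have hsne : PySem.List.sorted block key ≠ [] := by
    rw [Ne, PySem.List.sorted_eq_nil_iff]; exact hne
  obtain ⟨m, t, hs⟩ := List.exists_cons_of_ne_nil hsne
  rw [hs]
  simp only [PySem.List.pyGetD_zero, List.getD_cons_zero]
  have hmem : m ∈ block := (PySem.List.mem_sorted block key false m).mp
    (hs ▸ List.mem_cons_self ..)
  have hle : ∀ y ∈ block, key m ≤ key y := PySem.List.key_head_sorted_le block key hs
  have hmapne : block.map key ≠ [] := by simpa using hne
  apply le_antisymm
  · obtain ⟨z, hz, hzk⟩ := List.mem_map.mp (PySem.List.minD_mem (block.map key) (fun x => x) 0 hmapne)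
    rw [← hzk]; exact hle z hz
  · exact PySem.List.minD_id_le _ _ _ (List.mem_map_of_mem hmem)

theorem pv_key_last (block : List (List Int)) (key : List Int → Int) (hne : block ≠ []) :
    key (PySem.List.pyGetD (PySem.List.sorted block key) (-1) [])
      = PySem.List.maxD (block.map key) (fun x => x) 0 := by
  have hsne : PySem.List.sorted block key ≠ [] := by
    rw [Ne, PySem.List.sorted_eq_nil_iff]; exact hne
  rw [PySem.List.pyGetD_neg_one (PySem.List.sorted block key) [] hsne]
  have hge : ∀ y ∈ block, key y ≤ key ((PySem.List.sorted block key).getLast hsne) := by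
    intro y hy
    have hy' : y ∈ PySem.List.sorted block key := (PySem.List.mem_sorted block key false y).mpr hy
    obtain ⟨p, hp, hyp⟩ := List.mem_iff_getElem.mp hy'
    have hmono := PySem.List.key_sorted_getElem_mono block key
      (p := p) (q := (PySem.List.sorted block key).length - 1) (by omega) (by omega)
    rw [hyp] at hmono
    rwa [List.getLast_eq_getElem]
  have hmem : (PySem.List.sorted block key).getLast hsne ∈ block := by
    rw [← PySem.List.mem_sorted block key false]
    exact List.getLast_mem hsne
  have hmapne : block.map key ≠ [] := by simpa using hne
  apply le_antisymm
  · exact PySem.List.le_maxD_id _ _ _ (List.mem_map_of_mem hmem)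
  · obtain ⟨z, hz, hzk⟩ := List.mem_map.mp (PySem.List.maxD_mem (block.map key) (fun x => x) 0 hmapne)
    rw [← hzk]; exact hge z hz

theorem pv_foldl_append_ifnot {α β : Type} (p : α → Prop) [DecidablePred p] (f : α → β)
    (l : List α) (acc : List β) :
    l.foldl (fun acc x => if p x then acc else acc ++ [f x]) acc
      = acc ++ (l.filter (fun x => decide (¬ p x))).map f := by
  have hfun : (fun (acc : List β) x => if p x then acc else acc ++ [f x])
      = (fun acc x => if ¬ p x then acc ++ [f x] else acc) := by
    funext acc x; by_cases h : p x <;> simp [h]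
  rw [hfun, PySem.List.foldl_append_ite]

theorem pv_lastNonQ (q : Int → Bool) :
    ∀ (l : List Int) (a : Int), l.Pairwise (· < ·) → (∀ x ∈ l, a < x) →
    (l.foldl (fun m r => if q r then m else r) a = a ∧ ∀ x ∈ l, q x = true)
    ∨ ((l.foldl (fun m r => if q r then m else r) a) ∈ l
        ∧ q (l.foldl (fun m r => if q r then m else r) a) = false
        ∧ ∀ x ∈ l, q x = false → x ≤ l.foldl (fun m r => if q r then m else r) a) := by
  intro l
  induction l using List.reverseRecOn with
  | nil => intro a _ _; left; exact ⟨rfl, by simp⟩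
  | append_singleton xs x ih =>
    intro a hpw ha
    have hpw' : xs.Pairwise (· < ·) := hpw.sublist (List.sublist_append_left xs [x])
    have hx : ∀ y ∈ xs, y < x := by
      intro y hy
      exact (List.pairwise_append.mp hpw).2.2 y hy x (List.mem_singleton_self x)
    have ha' : ∀ y ∈ xs, a < y := fun y hy => ha y (List.mem_append_left _ hy)
    rw [List.foldl_append]
    simp only [List.foldl_cons, List.foldl_nil]
    cases hqx : q x with
    | false =>
      simp only [hqx, Bool.false_eq_true, if_false]
      right
      refine ⟨List.mem_append_right _ (List.mem_singleton_self x), by simp [hqx], ?_⟩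
      intro y hy _
      rcases List.mem_append.mp hy with h | h
      · exact le_of_lt (hx y h)
      · simp at h; omega
    | true =>
      simp only [hqx, if_true]
      rcases ih a hpw' ha' with ⟨heq, hall⟩ | ⟨hmem, hq, hmax⟩
      · left
        refine ⟨heq, ?_⟩
        intro y hy
        rcases List.mem_append.mp hy with h | h
        · exact hall y h
        · simp at h; rw [h]; exact hqx
      · right
        refine ⟨List.mem_append_left _ hmem, hq, ?_⟩
        intro y hy hqy
        rcases List.mem_append.mp hy with h | h
        · exact hmax y h hqy
        · simp at h; rw [h] at hqy; rw [hqy] at hqx; cases hqx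

theorem pv_mem_map_toList (cells : List (Int × Int)) (r c : Int) :
    ([r, c] ∈ cells.map pvToList) ↔ (r, c) ∈ cells := by
  constructor
  · intro h
    obtain ⟨p, hp, he⟩ := List.mem_map.mp h
    have hpe : p = (r, c) := by
      obtain ⟨pr, pc⟩ := p
      simp only [pvToList, List.cons.injEq, and_true] at he
      simp [he.1, he.2]
    exact hpe ▸ hp
  · intro h
    exact List.mem_map.mpr ⟨(r, c), h, rfl⟩

theorem pv_fill_eq (b : List (List Int)) (cells : List (Int × Int)) (n : Int)
    (hne : cells ≠ []) (hr : ∀ p ∈ cells, 0 ≤ p.1) :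
    canFill b (cells.map pvToList) n = pvFillable b (pvReqs cells) := by
  have hblock : cells.map pvToList ≠ [] := by simpa using hne
  have hcomp0 : (pvToList · |> (fun x => PySem.List.pyGetD x 0 0)) = (fun p : Int × Int => p.1) := by
    funext p; simp [pvToList, PySem.List.pyGetD_ofNat']
  have hmin0 : PySem.List.pyGetD (PySem.List.pyGetD
        (PySem.List.sorted (cells.map pvToList) (fun x => PySem.List.pyGetD x 0 0)) 0 []) 0 0
      = PySem.List.minD (cells.map (fun p => p.1)) (fun x => x) 0 := by
    have h := pv_key_head (cells.map pvToList) (fun x => PySem.List.pyGetD x 0 0) hblock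
    rw [List.map_map] at h
    simpa [pvToList, PySem.List.pyGetD_ofNat', Function.comp] using h
  have hmax0 : PySem.List.pyGetD (PySem.List.pyGetD
        (PySem.List.sorted (cells.map pvToList) (fun x => PySem.List.pyGetD x 0 0)) (-1) []) 0 0
      = PySem.List.maxD (cells.map (fun p => p.1)) (fun x => x) 0 := by
    have h := pv_key_last (cells.map pvToList) (fun x => PySem.List.pyGetD x 0 0) hblock
    rw [List.map_map] at h
    simpa [pvToList, PySem.List.pyGetD_ofNat', Function.comp] using h
  have hmin1 : PySem.List.pyGetD (PySem.List.pyGetD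
        (PySem.List.sorted (cells.map pvToList) (fun x => PySem.List.pyGetD x 1 0)) 0 []) 1 0
      = PySem.List.minD (cells.map (fun p => p.2)) (fun x => x) 0 := by
    have h := pv_key_head (cells.map pvToList) (fun x => PySem.List.pyGetD x 1 0) hblock
    rw [List.map_map] at h
    simpa [pvToList, PySem.List.pyGetD_ofNat', Function.comp] using h
  have hmax1 : PySem.List.pyGetD (PySem.List.pyGetD
        (PySem.List.sorted (cells.map pvToList) (fun x => PySem.List.pyGetD x 1 0)) (-1) []) 1 0
      = PySem.List.maxD (cells.map (fun p => p.2)) (fun x => x) 0 := by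
    have h := pv_key_last (cells.map pvToList) (fun x => PySem.List.pyGetD x 1 0) hblock
    rw [List.map_map] at h
    simpa [pvToList, PySem.List.pyGetD_ofNat', Function.comp] using h
  unfold canFill
  simp only [hmin0, hmax0, hmin1, hmax1]
  simp only [pv_foldl_append_ifnot]
  rw [PySem.List.foldl_append_eq_flatMap, List.nil_append]
  simp only [pvFillable, pvReqs, PySem.List.foldl_append_singleton_eq_map, List.nil_append]
  apply Bool.eq_iff_iff.mpr
  simp only [List.all_eq_true, List.mem_flatMap, List.mem_map, List.mem_filter,
    decide_eq_true_eq, beq_iff_eq, forall_exists_index, and_imp]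
  have hr0 : 0 ≤ PySem.List.minD (List.map (fun p => p.1) cells) (fun x => x) 0 := by
    have hne' : List.map (fun p : Int × Int => p.1) cells ≠ [] := by simpa using hne
    obtain ⟨p, hp, hpe⟩ := List.mem_map.mp
      (PySem.List.minD_mem (List.map (fun p => p.1) cells) (fun x => x) 0 hne')
    exact hpe ▸ hr p hp
  have hq : ∀ r c : Int, ((PySem.Set.ofList cells).contains (r, c) = true) ↔ (r, c) ∈ cells :=
    fun r c => (PySem.Set.contains_iff _ _).trans (PySem.Set.mem_ofList cells (r, c))
  have hnotiff : ∀ row col : Int,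
      (¬∃ a ∈ cells, pvToList a = [row, col]) ↔ (row, col) ∉ cells := by
    intro row col
    rw [← pv_mem_map_toList cells row col, List.mem_map]
  have hln := fun (c : Int) => pv_lastNonQ
    (fun r => (PySem.Set.ofList cells).contains (r, c))
    (PySem.List.pyRange (PySem.List.minD (List.map (fun p => p.1) cells) (fun x => x) 0)
      (PySem.List.maxD (List.map (fun p => p.1) cells) (fun x => x) 0 + 1))
    (-1) (PySem.List.pairwise_lt_pyRange_one _ _)
    (by intro x hx; have := (PySem.List.mem_pyRange_one.mp hx).1; omega)
  constructor
  · intro hA p c hc hpc i hi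
    subst hpc
    rcases hln c with ⟨heq, _⟩ | ⟨hmem, hqf, _⟩
    · rw [heq] at hi
      have := PySem.List.mem_pyRange_one.mp hi
      exfalso; omega
    · have hA' := hA _ _ hmem c hc
        ((hnotiff _ c).mpr (fun hm => by rw [(hq _ c).mpr hm] at hqf; cases hqf)) rfl i
      simp only [PySem.List.pyGetD_ofNat', List.getD_cons_zero, List.getD_cons_succ] at hA'
      exact hA' hi
  · intro hB x row hrow col hcol hnot heq i hi
    subst heq
    simp only [PySem.List.pyGetD_ofNat', List.getD_cons_zero, List.getD_cons_succ] at hi ⊢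
    have hnm : (row, col) ∉ cells := (hnotiff row col).mp hnot
    rcases hln col with ⟨heq2, hall⟩ | ⟨hmem, hqf, hmax⟩
    · exact absurd ((hq row col).mp (hall row hrow)) hnm
    · have hqr : (PySem.Set.ofList cells).contains (row, col) = false :=
        Bool.eq_false_iff.mpr (fun ht => hnm ((hq row col).mp ht))
      have hrle := hmax row hrow hqr
      have hi' := PySem.List.mem_pyRange_one.mp hi
      exact hB (col, _) col hcol rfl i (PySem.List.mem_pyRange_one.mpr ⟨by omega, by omega⟩)

-- ---------- one pass of the while-loop, described once ----------

def pvPass (C : Int → List (Int × Int)) : List Int → List (List Int) → Int →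
    (List (List Int) × Int × List Int × List Int)
  | [], b, r => (b, r, [], [])
  | v :: L, b, r =>
    if pvFillable b (pvReqs (C v)) then
      let s := pvPass C L (pvErase b (C v)) (r + 1)
      (s.1, s.2.1, v :: s.2.2.1, s.2.2.2)
    else
      let s := pvPass C L b r
      (s.1, s.2.1, s.2.2.1, v :: s.2.2.2)

theorem pv_passA (n : Int) (bd : PySem.Dict Int (List (List Int))) (C : Int → List (Int × Int)) :
    ∀ (L : List Int) (b : List (List Int)) (r : Int) (e : Bool) (rem : List Int),
    (∀ v ∈ L, bd.getD v [] = (C v).map pvToList) →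
    (∀ v ∈ L, C v ≠ [] ∧ ∀ p ∈ C v, 0 ≤ p.1) →
    L.foldl (fun (s : List (List Int) × Int × Bool × List Int) key =>
        let block := bd.getD key []
        if canFill s.1 block n then (eraseBlock s.1 block, s.2.1 + 1, true, s.2.2.2 ++ [key])
        else s) (b, r, e, rem)
      = ((pvPass C L b r).1, (pvPass C L b r).2.1,
         e || !(pvPass C L b r).2.2.1.isEmpty, rem ++ (pvPass C L b r).2.2.1) := by
  intro L
  induction L with
  | nil => intro b r e rem _ _; simp [pvPass]
  | cons v L ih =>
    intro b r e rem hbd hC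
    have hb := hbd v (List.mem_cons_self ..)
    have hCv := hC v (List.mem_cons_self ..)
    have hfill : canFill b (bd.getD v []) n = pvFillable b (pvReqs (C v)) := by
      rw [hb]; exact pv_fill_eq b (C v) n hCv.1 hCv.2
    simp only [List.foldl_cons]
    by_cases hf : pvFillable b (pvReqs (C v))
    · rw [hfill, if_pos hf, hb, pv_erase_eq]
      rw [ih (pvErase b (C v)) (r + 1) true (rem ++ [v])
        (fun w hw => hbd w (List.mem_cons_of_mem v hw))
        (fun w hw => hC w (List.mem_cons_of_mem v hw))]
      simp only [pvPass, if_pos hf]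
      simp [List.append_assoc]
    · rw [hfill, if_neg hf]
      rw [ih b r e rem
        (fun w hw => hbd w (List.mem_cons_of_mem v hw))
        (fun w hw => hC w (List.mem_cons_of_mem v hw))]
      simp only [pvPass, if_neg hf]

theorem pv_passB (C : Int → List (Int × Int)) :
    ∀ (L : List Int) (b : List (List Int)) (r : Int) (e : Bool)
      (rest : List (List (Int × Int) × List (Int × Int))),
    (L.map (fun v => (C v, pvReqs (C v)))).foldl
      (fun (s : List (List Int) × Int × Bool × List (List (Int × Int) × List (Int × Int))) blk =>
        if pvFillable s.1 blk.2 then (pvErase s.1 blk.1, s.2.1 + 1, true, s.2.2.2)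
        else (s.1, s.2.1, s.2.2.1, s.2.2.2 ++ [blk])) (b, r, e, rest)
      = ((pvPass C L b r).1, (pvPass C L b r).2.1,
         e || !(pvPass C L b r).2.2.1.isEmpty,
         rest ++ ((pvPass C L b r).2.2.2).map (fun v => (C v, pvReqs (C v)))) := by
  intro L
  induction L with
  | nil => intro b r e rest; simp [pvPass]
  | cons v L ih =>
    intro b r e rest
    simp only [List.map_cons, List.foldl_cons]
    by_cases hf : pvFillable b (pvReqs (C v))
    · rw [show (if pvFillable b (C v, pvReqs (C v)).2 = true
          then (pvErase b (C v, pvReqs (C v)).1, r + 1, true, rest)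
          else (b, r, e, rest ++ [(C v, pvReqs (C v))]))
          = (pvErase b (C v), r + 1, true, rest) from by rw [if_pos hf]]
      rw [ih (pvErase b (C v)) (r + 1) true rest]
      simp only [pvPass, if_pos hf]
      simp
    · rw [show (if pvFillable b (C v, pvReqs (C v)).2 = true
          then (pvErase b (C v, pvReqs (C v)).1, r + 1, true, rest)
          else (b, r, e, rest ++ [(C v, pvReqs (C v))]))
          = (b, r, e, rest ++ [(C v, pvReqs (C v))]) from by rw [if_neg hf]]
      rw [ih b r e (rest ++ [(C v, pvReqs (C v))])]
      simp only [pvPass, if_neg hf]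
      simp [List.append_assoc]

theorem pv_pass_partition (C : Int → List (Int × Int)) :
    ∀ (L : List Int) (b : List (List Int)) (r : Int), L.Nodup →
    (∀ v ∈ (pvPass C L b r).2.2.1, v ∈ L) ∧
    (∀ v ∈ (pvPass C L b r).2.2.2, v ∈ L) ∧
    L.filter (fun v => !((pvPass C L b r).2.2.1.contains v)) = (pvPass C L b r).2.2.2 := by
  intro L
  induction L with
  | nil => intro b r _; exact ⟨by simp [pvPass], by simp [pvPass], by simp [pvPass]⟩
  | cons v L ih =>
    intro b r hnd
    have hv : v ∉ L := (List.nodup_cons.mp hnd).1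
    have hnd' : L.Nodup := (List.nodup_cons.mp hnd).2
    by_cases hf : pvFillable b (pvReqs (C v))
    · obtain ⟨hE, hK, hfilter⟩ := ih (pvErase b (C v)) (r + 1) hnd'
      simp only [pvPass, if_pos hf]
      refine ⟨?_, ?_, ?_⟩
      · intro w hw
        rcases List.mem_cons.mp hw with h | h
        · exact h ▸ List.mem_cons_self ..
        · exact List.mem_cons_of_mem v (hE w h)
      · intro w hw
        exact List.mem_cons_of_mem v (hK w hw)
      · rw [List.filter_cons]
        rw [if_neg (by simp)]
        rw [← hfilter]
        apply List.filter_congr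
        intro x hx
        have hxv : x ≠ v := fun hxe => hv (hxe ▸ hx)
        simp [List.contains_cons, hxv]
    · obtain ⟨hE, hK, hfilter⟩ := ih b r hnd'
      simp only [pvPass, if_neg hf]
      refine ⟨?_, ?_, ?_⟩
      · intro w hw
        exact List.mem_cons_of_mem v (hE w hw)
      · intro w hw
        rcases List.mem_cons.mp hw with h | h
        · exact h ▸ List.mem_cons_self ..
        · exact List.mem_cons_of_mem v (hK w h)
      · rw [List.filter_cons]
        have hvnot : v ∉ (pvPass C L b r).2.2.1 := fun hc => absurd (hE v hc) hv
        rw [if_pos (by simp [hvnot])]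
        rw [← hfilter]

-- ---------- popping the erased keys ----------

theorem pv_popD_eq_erase {κ ν : Type} [BEq κ] (d : PySem.Dict κ ν) (k : κ) :
    ((d.pop? k).map (fun p => p.2)).getD d = d.erase k := by
  unfold PySem.Dict.pop?
  cases h : d.get? k with
  | none =>
    simp only [h, Option.map_none, Option.getD_none]
    have hall : ∀ p ∈ d.items, (!(p.1 == k)) = true := by
      intro p hp
      have hfind : d.items.find? (fun p => p.1 == k) = none := by
        unfold PySem.Dict.get? at h
        cases hf : List.find? (fun p => p.1 == k) d.items with
        | none => rfl
        | some q => rw [hf] at h; cases h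
      have := List.find?_eq_none.mp hfind p hp
      simpa using this
    apply PySem.Dict.ext
    show d.items = d.items.filter (fun p => !(p.1 == k))
    exact (List.filter_eq_self.mpr hall).symm
  | some v =>
    simp [h]

theorem pv_erase_fold {κ ν : Type} [BEq κ] (E : List κ) :
    ∀ d : PySem.Dict κ ν,
    (E.foldl (fun d k => d.erase k) d).items
      = d.items.filter (fun p => !(E.contains p.1)) := by
  induction E with
  | nil => intro d; simp
  | cons k E ih =>
    intro d
    simp only [List.foldl_cons]
    rw [ih]
    show ((PySem.Dict.mk (d.items.filter (fun p => !(p.1 == k)))).items).filter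
        (fun p => !(E.contains p.1)) = _
    simp only []
    rw [List.filter_filter]
    apply List.filter_congr
    intro p _
    cases h1 : (p.1 == k) <;> cases h2 : E.contains p.1 <;>
      simp [List.contains_cons, h1, h2]

-- ---------- the while-loop ----------

theorem pv_loop_eq (n : Int) (C : Int → List (Int × Int)) :
    ∀ (fuel : Nat) (L : List Int) (bd : PySem.Dict Int (List (List Int)))
      (blocks : List (List (Int × Int) × List (Int × Int))) (b : List (List Int)) (res : Int),
    L.Nodup →
    bd.items = L.map (fun v => (v, (C v).map pvToList)) →
    blocks = L.map (fun v => (C v, pvReqs (C v))) →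
    (∀ v ∈ L, C v ≠ [] ∧ ∀ p ∈ C v, 0 ≤ p.1) →
    pvLoopA n fuel b bd res = pvLoopB fuel b blocks res := by
  intro fuel
  induction fuel with
  | zero => intros; rfl
  | succ fuel ih =>
    intro L bd blocks b res hnd hbd hblocks hC
    have hkeys : bd.keys = L := by
      show bd.items.map (fun x => x.1) = L
      rw [hbd, List.map_map]
      have : ((fun x : Int × List (List Int) => x.1) ∘ (fun v => (v, (C v).map pvToList)))
          = fun v : Int => v := by funext v; rfl
      rw [this, List.map_id']
    have hndk : bd.keys.Nodup := by rw [hkeys]; exact hnd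
    have hget : ∀ v ∈ L, bd.getD v [] = (C v).map pvToList := by
      intro v hv
      exact PySem.Dict.getD_of_mem_items bd
        (by rw [hbd]; exact List.mem_map_of_mem hv) hndk []
    obtain ⟨hE, hK, hfilter⟩ := pv_pass_partition C L b res hnd
    simp only [pvLoopA, pvLoopB]
    rw [hkeys, hblocks]
    rw [pv_passA n bd C L b res false [] hget hC]
    rw [pv_passB C L b res false []]
    simp only [Bool.false_or, List.nil_append]
    by_cases he : (pvPass C L b res).2.2.1.isEmpty
    · rw [he]
      simp
    · have hcond : (!(pvPass C L b res).2.2.1.isEmpty) = true := by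
        cases hE0 : (pvPass C L b res).2.2.1.isEmpty
        · rfl
        · exact absurd hE0 he
      rw [hcond]
      simp only [if_true]
      have hfun : (fun (d : PySem.Dict Int (List (List Int))) k =>
          (Option.map (fun p => p.2) (d.pop? k)).getD d) = fun d k => d.erase k :=
        funext fun d => funext fun k => pv_popD_eq_erase d k
      rw [hfun]
      apply ih (pvPass C L b res).2.2.2
      · rw [← hfilter]
        exact hnd.filter _
      · rw [pv_erase_fold, hbd, List.filter_map]
        have hpred : ((fun (p : Int × List (List Int)) =>
            !(pvPass C L b res).2.2.1.contains p.1) ∘ (fun v => (v, List.map pvToList (C v))))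
            = (fun v => !(pvPass C L b res).2.2.1.contains v) := rfl
        rw [hpred, hfilter]
      · rfl
      · intro v hv
        exact hC v (hK v hv)

-- ---------- facts about the keys and their cells ----------

theorem pv_key_ne_zero (board : List (List Int)) (n v : Int)
    (hv : v ∈ PySem.Set.ofList (pvNums board n)) : v ≠ 0 := by
  have hv' : v ∈ pvNums board n := (PySem.Set.mem_ofList _ _).mp hv
  unfold pvNums at hv'
  exact of_decide_eq_true (List.mem_filter.mp hv').2

theorem pv_cells_good (board : List (List Int)) (n v : Int)
    (hv : v ∈ PySem.Set.ofList (pvNums board n)) :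
    pvCellsOf board n v ≠ [] ∧ ∀ p ∈ pvCellsOf board n v, 0 ≤ p.1 := by
  have hv' : v ∈ pvNums board n := (PySem.Set.mem_ofList _ _).mp hv
  unfold pvNums at hv'
  obtain ⟨hvm, _⟩ := List.mem_filter.mp hv'
  obtain ⟨i, hi, hj⟩ := List.mem_flatMap.mp hvm
  obtain ⟨j, hjr, hje⟩ := List.mem_map.mp hj
  constructor
  · apply List.ne_nil_of_mem (a := (i, j))
    unfold pvCellsOf
    exact List.mem_flatMap.mpr ⟨i, hi,
      List.mem_map.mpr ⟨j, List.mem_filter.mpr ⟨hjr, by simp [hje]⟩, rfl⟩⟩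
  · intro p hp
    unfold pvCellsOf at hp
    obtain ⟨i', hi', hp'⟩ := List.mem_flatMap.mp hp
    obtain ⟨j', _, hpe⟩ := List.mem_map.mp hp'
    rw [← hpe]
    exact (PySem.List.mem_pyRange_one.mp hi').1

-- ===== VERDICT (by name: the statement is the Claim_ definition above) =====
theorem solution_spec : Claim_equal_solution := by
  intro board _ _
  show solution board = solution_alt board
  simp only [solution, solution_alt]
  rw [pv_os_eq]
  simp only [pv_cellsB_eq, PySem.List.foldl_append_singleton_eq_map, List.nil_append]
  have hndk := pv_nodup_keys_mkbd board (board.length : Int)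
  have hnd : (PySem.Set.ofList (pvNums board (board.length : Int))).Nodup := by
    rw [← pv_keys_mkbd]; exact hndk
  have hitems : (makeBlockDict board (board.length : Int)).items
      = (PySem.Set.ofList (pvNums board (board.length : Int))).map
          (fun v => (v, (pvCellsOf board (board.length : Int) v).map pvToList)) := by
    rw [PySem.Dict.items_eq_map_keys _ hndk [], pv_keys_mkbd]
    apply List.map_congr_left
    intro v hv
    rw [pv_getD_mkbd board _ v (pv_key_ne_zero board _ v hv)]
  have hsize : (makeBlockDict board (board.length : Int)).size
      = (PySem.Set.ofList (pvNums board (board.length : Int))).length := by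
    show (makeBlockDict board (board.length : Int)).items.length = _
    rw [hitems, List.length_map]
  rw [hsize, List.length_map]
  exact pv_loop_eq (board.length : Int) (pvCellsOf board (board.length : Int))
    ((PySem.Set.ofList (pvNums board (board.length : Int))).length + 1)
    (PySem.Set.ofList (pvNums board (board.length : Int)))
    (makeBlockDict board (board.length : Int)) _ board 0 hnd hitems rfl
    (fun v hv => pv_cells_good board _ v hv)
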